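-- pv_equiv track=rewrite | github.com/yani-rivera/UrbanGrowthSDG11 | real_estate_parser/modules/SplitByCuev1.py | find_cue_index
-- ===== SOURCE A (Python) =====
-- def find_cue_index(line: str, cue: str) -> int:
--     """Find first cue index, but skip numeric-grouping commas: DIGIT , [SPACE]? DIGIT."""
--     if cue != ',':
--         return line.find(cue)
--     i = 0
--     while True:
--         i = line.find(',', i)
--         if i == -1:
--             return -1
--         prev = line[i-1] if i-1 >= 0 else ''
--         j = i + 1
--         if j < len(line) and line[j] == ' ':
--             j += 1
--         nxt = line[j] if j < len(line) else ''
--         if prev.isdigit() and nxt.isdigit():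
--             i += 1
--             continue
--         return i
-- ===== SOURCE B (Python) =====
-- import re
--
-- # A comma is "non-grouping" unless it sits between a digit and (an optional single
-- # space then) a digit.  Non-grouping comma = (?<!\d),  OR  ,(?! ?\d).
-- _NON_GROUPING_COMMA = re.compile(r'(?<!\d),|,(?! ?\d)')
--
-- def find_cue_index(line: str, cue: str) -> int:
--     """Find first cue index, but skip numeric-grouping commas: DIGIT , [SPACE]? DIGIT."""
--     if cue != ',':
--         return line.find(cue)
--     m = _NON_GROUPING_COMMA.search(line)
--     return m.start() if m else -1
-- ===== Notes on version B (the rewrite author's own statement) =====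
-- stated objective: idiomatic
-- what changed: Replaces A's hand-rolled restartable while-loop of line.find(',', i) calls with manual prev/next positional probes by a compiled regular-expression search for a non-grouping comma, pattern (?<!\d),|,(?! ?\d), returning m.start() of the first match or -1.
import Mathlib
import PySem

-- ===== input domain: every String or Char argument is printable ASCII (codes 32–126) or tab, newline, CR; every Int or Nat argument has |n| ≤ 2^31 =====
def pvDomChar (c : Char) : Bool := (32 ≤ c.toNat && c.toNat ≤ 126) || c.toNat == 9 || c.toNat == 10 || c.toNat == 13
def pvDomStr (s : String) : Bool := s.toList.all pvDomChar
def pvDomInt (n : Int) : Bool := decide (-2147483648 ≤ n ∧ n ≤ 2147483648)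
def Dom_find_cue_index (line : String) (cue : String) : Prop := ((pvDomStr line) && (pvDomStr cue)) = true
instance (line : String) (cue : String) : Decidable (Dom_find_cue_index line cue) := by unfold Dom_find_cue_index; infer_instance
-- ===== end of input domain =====

-- B replaces A's restartable find(',', i) loop with a (compiled-)regex search for a
-- non-grouping comma, pattern (?<!\d),|,(?! ?\d)  (objective: idiomatic, same O(n) cost).


-- ===== PORT A =====
-- A's while-loop: i := line.find(',', i); test prev/next; on a grouping comma restart at i+1.
-- fuel = length+1 is a totality guard only: the restart index strictly increases, so fuel never runs out.
-- Python's '' (out-of-range prev/nxt) has ''.isdigit() = False; the port guards the index instead,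
-- and uses the non-digit default '?' for the guarded getD.
def find_cue_index_loop (cs : List Char) : Nat → Nat → Int
  | 0, _ => -1
  | fuel+1, i =>
      let f := PySem.Chars.findFrom cs [','] (i : Int) none
      if f = -1 then -1
      else
        let k := f.toNat
        let prevD := decide (1 ≤ k) && PySem.Chars.isdigit (cs.getD (k-1) '?')
        let j := if k+1 < cs.length ∧ cs.getD (k+1) '?' = ' ' then k+2 else k+1
        let nxtD := decide (j < cs.length) && PySem.Chars.isdigit (cs.getD j '?')
        if prevD && nxtD then find_cue_index_loop cs fuel (k+1) else (k : Int)

def find_cue_index (line : String) (cue : String) : Int :=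
  if cue ≠ "," then PySem.Str.find line cue
  else find_cue_index_loop line.toList (line.toList.length + 1) 0

-- ===== PORT B =====
-- Source B's regex search, ported by its semantics on the ASCII domain: re.search(p, line)
-- returns the leftmost position where the pattern matches.  pvRegexMatchAt is the fixed
-- pattern (?<!\d),|,(?! ?\d) decided at one position: alternative 1 is a comma with the
-- negative lookbehind (?<!\d); alternative 2 is a comma with the negative lookahead
-- (?! ?\d), i.e. neither digit-at-i+1 nor space-at-i+1-then-digit-at-i+2.  Out-of-range
-- reads use the default '?' (not a digit, not a space), matching the end-of-string
-- behaviour of lookaround.  On the printable-ASCII domain \d coincides with isdigit.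
def pvRegexMatchAt (cs : List Char) (i : Nat) : Bool :=
  (cs.getD i '?' = ',') &&
  ( !(decide (1 ≤ i) && PySem.Chars.isdigit (cs.getD (i-1) '?'))
    || !(PySem.Chars.isdigit (cs.getD (i+1) '?')
         || (cs.getD (i+1) '?' = ' ' && PySem.Chars.isdigit (cs.getD (i+2) '?'))) )

-- re.search = first position in 0..len-1 where the pattern matches (an empty match is
-- impossible: every alternative consumes the comma), m.start() if found else -1.
def find_cue_index_alt (line : String) (cue : String) : Int :=
  if cue ≠ "," then PySem.Str.find line cue
  else
    match (List.range line.toList.length).find? (fun i => pvRegexMatchAt line.toList i) with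
    | some i => (i : Int)
    | none => -1

-- ===== PRECONDITION & SPEC =====
def Spec_find_cue_index (line : String) (cue : String) (out : Int) : Prop := out = find_cue_index_alt line cue
instance (line : String) (cue : String) (out : Int) : Decidable (Spec_find_cue_index line cue out) := by unfold Spec_find_cue_index; infer_instance

-- ===== CLAIM (what is proved, stated in full; the proofs are below) =====
def Claim_equal_find_cue_index : Prop := ∀ (line : String) (cue : String), Dom_find_cue_index line cue → Spec_find_cue_index line cue (find_cue_index line cue)

-- ===== LEMMAS AND PROOFS =====

-- 'index k of cs is a non-grouping comma' (out-of-range reads use the non-digit, non-space '?')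
def pvGoodAt (cs : List Char) (k : Nat) : Bool :=
  decide (cs.getD k '?' = ',') &&
  !((decide (1 ≤ k) && PySem.Chars.isdigit (cs.getD (k-1) '?')) &&
    PySem.Chars.isdigit (cs.getD (if cs.getD (k+1) '?' = ' ' then k+2 else k+1) '?'))

-- first index ≥ i that is a non-grouping comma, else -1: the common characterisation
def pvFirstGood (cs : List Char) (i : Nat) : Int :=
  if _h : i < cs.length then
    if pvGoodAt cs i then (i : Int) else pvFirstGood cs (i+1)
  else -1
  termination_by cs.length - i

lemma pvIsdigit_q : PySem.Chars.isdigit '?' = false := by decide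

lemma pvFirstGood_ge (cs : List Char) (i : Nat) (h : cs.length ≤ i) :
    pvFirstGood cs i = -1 := by
  rw [pvFirstGood]; simp [Nat.not_lt.mpr h]

lemma pvFirstGood_step (cs : List Char) (i : Nat) (h : i < cs.length) :
    pvFirstGood cs i = if pvGoodAt cs i then (i : Int) else pvFirstGood cs (i+1) := by
  rw [pvFirstGood]; simp [h]

lemma pvFirstGood_skip (cs : List Char) (m : Nat) : ∀ i, i ≤ m → m ≤ cs.length →
    (∀ j, i ≤ j → j < m → pvGoodAt cs j = false) → pvFirstGood cs i = pvFirstGood cs m := by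
  induction m with
  | zero => intro i hi _ _; have : i = 0 := by omega
            rw [this]
  | succ m ih =>
      intro i hi hm hbad
      rcases Nat.eq_or_lt_of_le hi with rfl | hlt
      · rfl
      · have h1 : pvFirstGood cs i = pvFirstGood cs m :=
          ih i (by omega) (by omega) (fun j hij hj => hbad j hij (by omega))
        rw [h1, pvFirstGood_step cs m (by omega), hbad m (by omega) (by omega)]
        simp

lemma pvSingleton_prefix_drop (cs : List Char) (m : Nat) (c : Char) :
    ([c] <+: cs.drop m) ↔ cs[m]? = some c := by
  rw [List.cons_prefix_iff]
  constructor
  · rintro ⟨r, hr, -⟩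
    rw [← List.head?_drop, hr]; rfl
  · intro h
    have hh : (cs.drop m).head? = some c := by rw [List.head?_drop]; exact h
    cases hd : cs.drop m with
    | nil => simp [hd] at hh
    | cons a r =>
        rw [hd] at hh; simp at hh
        exact ⟨r, by simp_all, List.nil_prefix⟩

lemma pvComma_at (cs : List Char) (m : Nat) :
    ([','] <+: cs.drop m) ↔ (m < cs.length ∧ cs.getD m '?' = ',') := by
  rw [pvSingleton_prefix_drop]
  constructor
  · intro h
    have hm : m < cs.length := by
      by_contra hc
      rw [List.getElem?_eq_none (by omega)] at h; simp at h
    refine ⟨hm, ?_⟩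
    rw [List.getD_eq_getElem?_getD, h]; rfl
  · rintro ⟨hm, h⟩
    rw [List.getElem?_eq_getElem hm]
    rw [List.getD_eq_getElem?_getD, List.getElem?_eq_getElem hm] at h
    simpa using h

lemma pvGoodAt_comma (cs : List Char) (j : Nat) (h : pvGoodAt cs j = true) :
    [','] <+: cs.drop j := by
  have h1 : cs.getD j '?' = ',' := by
    unfold pvGoodAt at h; simp at h; exact h.1
  have hl : j < cs.length := by
    by_contra hc
    rw [List.getD_eq_default _ _ (by omega)] at h1
    exact absurd h1 (by decide)
  exact (pvComma_at _ _).mpr ⟨hl, h1⟩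

-- out-of-range reads through the default '?': the explicit bound guards are redundant
lemma pvJ_eq (cs : List Char) (k : Nat) :
    (if k+1 < cs.length ∧ cs.getD (k+1) '?' = ' ' then k+2 else k+1) =
    (if cs.getD (k+1) '?' = ' ' then k+2 else k+1) := by
  by_cases h : k+1 < cs.length
  · simp [h]
  · have hd : cs.getD (k+1) '?' = '?' := List.getD_eq_default _ _ (by omega)
    rw [hd]
    simp [h]

lemma pvGuard_eq (cs : List Char) (j : Nat) :
    (decide (j < cs.length) && PySem.Chars.isdigit (cs.getD j '?')) =
    PySem.Chars.isdigit (cs.getD j '?') := by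
  by_cases h : j < cs.length
  · simp [h]
  · rw [List.getD_eq_default _ _ (by omega)]
    simp [h, pvIsdigit_q]

-- A's branch test at a comma position is the negation of pvGoodAt there
lemma pvGoodAt_at_comma (cs : List Char) (k : Nat) (hc : cs.getD k '?' = ',') :
    pvGoodAt cs k =
      !((decide (1 ≤ k) && PySem.Chars.isdigit (cs.getD (k-1) '?')) &&
        (decide ((if k+1 < cs.length ∧ cs.getD (k+1) '?' = ' ' then k+2 else k+1) < cs.length) &&
         PySem.Chars.isdigit
           (cs.getD (if k+1 < cs.length ∧ cs.getD (k+1) '?' = ' ' then k+2 else k+1) '?'))) := by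
  unfold pvGoodAt
  rw [hc, pvJ_eq cs k, pvGuard_eq]
  simp

lemma pvA_eq (cs : List Char) : ∀ fuel i, i ≤ cs.length → cs.length - i < fuel →
    find_cue_index_loop cs fuel i = pvFirstGood cs i := by
  intro fuel
  induction fuel with
  | zero => intro i h1 h2; omega
  | succ fuel ih =>
      intro i h1 h2
      simp only [find_cue_index_loop]
      by_cases hf : PySem.Chars.findFrom cs [','] (i : Int) none = -1
      · rw [if_pos hf]
        have nocomma : ¬ [','] <:+: cs.drop i :=
          (PySem.Chars.findFrom_natCast_eq_neg_one_iff cs [','] i h1).mp hf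
        have hskip : pvFirstGood cs i = pvFirstGood cs cs.length := by
          refine pvFirstGood_skip cs cs.length i h1 le_rfl (fun j hij hj => ?_)
          by_contra hg
          have hg' : pvGoodAt cs j = true := by
            cases hgb : pvGoodAt cs j
            · exact absurd hgb hg
            · rfl
          have hpre := pvGoodAt_comma cs j hg'
          have hsuf : cs.drop j <:+ cs.drop i := by
            rw [show j = i + (j - i) by omega, ← List.drop_drop]
            exact List.drop_suffix _ _
          exact nocomma (hpre.isInfix.trans hsuf.isInfix)
        rw [hskip, pvFirstGood_ge cs _ le_rfl]
      · rw [if_neg hf]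
        obtain ⟨hle, hpre, hmin⟩ := PySem.Chars.findFrom_natCast_spec cs [','] i h1 hf
        obtain ⟨hklen, hkc⟩ := (pvComma_at cs _).mp hpre
        set k := (PySem.Chars.findFrom cs [','] (i : Int) none).toNat with hk
        have hik : i ≤ k := by omega
        have hskip : pvFirstGood cs i = pvFirstGood cs k := by
          refine pvFirstGood_skip cs k i hik (le_of_lt hklen) (fun j hij hj => ?_)
          by_contra hg
          have hg' : pvGoodAt cs j = true := by
            cases hgb : pvGoodAt cs j
            · exact absurd hgb hg
            · rfl
          exact hmin j hij hj (pvGoodAt_comma cs j hg')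
        rw [hskip, pvFirstGood_step cs k hklen, pvGoodAt_at_comma cs k hkc]
        by_cases hx : ((decide (1 ≤ k) && PySem.Chars.isdigit (cs.getD (k-1) '?')) &&
            (decide ((if k+1 < cs.length ∧ cs.getD (k+1) '?' = ' ' then k+2 else k+1) < cs.length) &&
             PySem.Chars.isdigit
               (cs.getD (if k+1 < cs.length ∧ cs.getD (k+1) '?' = ' ' then k+2 else k+1) '?'))) = true
        · rw [if_pos ?_, hx]
          · simp only [Bool.not_true, Bool.false_eq_true, if_false]
            exact ih (k+1) (by omega) (by omega)
          · rw [hx]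
        · rw [if_neg ?_]
          · have : ((decide (1 ≤ k) && PySem.Chars.isdigit (cs.getD (k-1) '?')) &&
              (decide ((if k+1 < cs.length ∧ cs.getD (k+1) '?' = ' ' then k+2 else k+1) < cs.length) &&
               PySem.Chars.isdigit
                 (cs.getD (if k+1 < cs.length ∧ cs.getD (k+1) '?' = ' ' then k+2 else k+1) '?'))) = false := by
              cases hgb : ((decide (1 ≤ k) && PySem.Chars.isdigit (cs.getD (k-1) '?')) &&
                (decide ((if k+1 < cs.length ∧ cs.getD (k+1) '?' = ' ' then k+2 else k+1) < cs.length) &&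
                 PySem.Chars.isdigit
                   (cs.getD (if k+1 < cs.length ∧ cs.getD (k+1) '?' = ' ' then k+2 else k+1) '?')))
              · rfl
              · exact absurd hgb hx
            rw [this]
            simp
          · exact hx

-- the regex predicate at one position equals pvGoodAt (De Morgan + case split on the space)
lemma pvMatchAt_eq_goodAt (cs : List Char) (k : Nat) :
    pvRegexMatchAt cs k = pvGoodAt cs k := by
  unfold pvRegexMatchAt pvGoodAt
  have hsp : PySem.Chars.isdigit ' ' = false := by decide
  by_cases hs : cs.getD (k+1) '?' = ' ' <;>
    cases h1 : (decide (1 ≤ k) && PySem.Chars.isdigit (cs.getD (k-1) '?')) <;>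
    cases h2 : PySem.Chars.isdigit (cs.getD (k+1) '?') <;>
    cases h3 : PySem.Chars.isdigit (cs.getD (k+2) '?') <;>
    simp_all [List.getD]

-- B's find? over range equals the common characterisation
lemma pvB_eq (cs : List Char) : ∀ n i, n = cs.length - i →
    (match (List.range' i n).find? (fun j => pvRegexMatchAt cs j) with
     | some j => (j : Int) | none => -1) = pvFirstGood cs i := by
  intro n
  induction n with
  | zero =>
      intro i h
      rw [pvFirstGood_ge cs i (by omega)]
      rfl
  | succ n ih =>
      intro i h
      have hi : i < cs.length := by omega
      rw [List.range'_succ, List.find?_cons, pvFirstGood_step cs i hi,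
          pvMatchAt_eq_goodAt cs i]
      by_cases hg : pvGoodAt cs i = true
      · simp [hg]
      · have hgf : pvGoodAt cs i = false := by
          cases hgb : pvGoodAt cs i
          · rfl
          · exact absurd hgb hg
        simp only [hgf, Bool.false_eq_true, if_false]
        exact ih (i+1) (by omega)

-- ===== VERDICT (by name: the statement is the Claim_ definition above) =====
theorem find_cue_index_spec : Claim_equal_find_cue_index := by
  intro line cue _
  unfold Spec_find_cue_index find_cue_index find_cue_index_alt
  by_cases h : cue = ","
  · simp only [h, ne_eq, not_true_eq_false, if_false]
    rw [pvA_eq line.toList (line.toList.length + 1) 0 (Nat.zero_le _) (by omega)]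
    rw [show List.range line.toList.length = List.range' 0 line.toList.length from
          List.range_eq_range' ..]
    exact (pvB_eq line.toList line.toList.length 0 (by omega)).symm
  · simp [h]
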